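-- pv_equiv track=rewrite | github.com/tttttiantian/GCPTest | agents/test_generator_agent.py | _extract_test_code_snippets
-- ===== SOURCE A (Python) =====
-- from typing import List, Dict, Optional, Tuple, Any
--
-- def _extract_test_code_snippets(test_code: str, test_names: List[str]) -> str:
--     """
--     提取指定测试函数的代码片段
--
--     Args:
--         test_code: 完整测试代码
--         test_names: 需要提取的测试函数名列表
--
--     Returns:
--         提取的代码片段
--     """
--     snippets = []
--     lines = test_code.split('\n')
--
--     for test_name in test_names:
--         in_test = False
--         test_lines = []
--
--         for line in lines:
--             if f'def {test_name}' in line: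
--                 in_test = True
--
--             if in_test:
--                 test_lines.append(line)
--
--                 # 检测函数结束 (下一个def或非缩进行)
--                 if line.strip() and not line.startswith((' ', '\t')) and len(test_lines) > 1:
--                     break
--
--         if test_lines:
--             snippets.append('\n'.join(test_lines))
--
--     return '\n\n'.join(snippets)
-- ===== SOURCE B (Python) =====
-- from typing import List
--
-- def _extract_test_code_snippets(test_code: str, test_names: List[str]) -> str:
--     lines = test_code.split('\n')
--     # dedented, non-blank lines terminate a block (computed once, not per name)
--     bounds = [i for i, ln in enumerate(lines)
--               if ln.strip() and not ln.startswith((' ', '\t'))]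
--     snippets = []
--     for test_name in test_names:
--         needle = 'def ' + test_name
--         start = None
--         for i, ln in enumerate(lines):
--             if needle in ln:
--                 start = i
--                 break
--         if start is None:
--             continue
--         end = next((b for b in bounds if b > start), len(lines) - 1)
--         snippets.append('\n'.join(lines[start:end + 1]))
--     return '\n\n'.join(snippets)
-- ===== Notes on version B (the rewrite author's own statement) =====
-- stated objective: alternative
-- what changed: Replaces A's per-name stateful scan (in_test flag appending lines with an inclusive break) by computing the list of dedented non-blank boundary line indices once; each name then finds its first matching line index, looks up the first boundary index past it, and slices the line list.
import Mathlib
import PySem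

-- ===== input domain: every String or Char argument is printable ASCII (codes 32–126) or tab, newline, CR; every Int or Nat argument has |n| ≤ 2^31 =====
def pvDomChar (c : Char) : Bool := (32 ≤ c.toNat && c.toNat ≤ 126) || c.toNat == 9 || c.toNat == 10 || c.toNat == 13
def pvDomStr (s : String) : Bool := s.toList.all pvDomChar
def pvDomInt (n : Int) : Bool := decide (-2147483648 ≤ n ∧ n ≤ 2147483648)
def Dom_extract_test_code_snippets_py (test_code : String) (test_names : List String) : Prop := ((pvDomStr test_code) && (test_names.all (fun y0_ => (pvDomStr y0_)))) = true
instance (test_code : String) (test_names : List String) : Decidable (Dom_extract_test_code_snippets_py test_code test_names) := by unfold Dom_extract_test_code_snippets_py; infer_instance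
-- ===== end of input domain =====

-- B computes the block boundaries once and slices the line list per name instead of
-- re-running A's stateful flag-and-break scan for every name (objective: alternative).


-- shared one-liner: `line.strip() and not line.startswith((' ', '\t'))` (textually identical in A and B)
def pvBoundary (line : String) : Bool :=
  decide (PySem.Str.strip line ≠ "") && !(PySem.Str.startswith line " " || PySem.Str.startswith line "\t")

-- ===== PORT A =====
-- inner `for line in lines: …` with its break, state = (in_test, test_lines)
def pvAInnerLoop (sub : String) : List String → Bool → List String → List String
  | [], _, test_lines => test_lines
  | line :: rest, in_test, test_lines =>
    let in_test := if PySem.Str.isIn sub line then true else in_test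
    if in_test then
      let test_lines := test_lines ++ [line]
      if pvBoundary line && decide (test_lines.length > 1) then test_lines
      else pvAInnerLoop sub rest in_test test_lines
    else pvAInnerLoop sub rest in_test test_lines

def extract_test_code_snippets_py (test_code : String) (test_names : List String) : String :=
  let lines := (PySem.Str.split? test_code "\n").getD []
  let snippets := test_names.foldl (fun snippets test_name =>
    let test_lines := pvAInnerLoop ("def " ++ test_name) lines false []
    if test_lines ≠ [] then snippets ++ [PySem.Str.join "\n" test_lines] else snippets) []
  PySem.Str.join "\n\n" snippets

-- ===== PORT B =====
-- Source B's `for i, ln in enumerate(lines): if needle in ln: start = i; break`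
def pvFindStart (needle : String) : List (Int × String) → Option Int
  | [] => none
  | (i, line) :: rest => if PySem.Str.isIn needle line then some i else pvFindStart needle rest

def extract_test_code_snippets_py_alt (test_code : String) (test_names : List String) : String :=
  let lines := (PySem.Str.split? test_code "\n").getD []
  let bounds := ((PySem.List.enumerate lines 0).filter (fun p => pvBoundary p.2)).map (·.1)
  let snippets := test_names.foldl (fun snippets test_name =>
    match pvFindStart ("def " ++ test_name) (PySem.List.enumerate lines 0) with
    | none => snippets
    | some start =>
      let e := (bounds.find? (fun b => decide (start < b))).getD (PySem.List.len lines - 1)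
      snippets ++ [PySem.Str.join "\n" (PySem.List.slice lines (some start) (some (e + 1)))]) []
  PySem.Str.join "\n\n" snippets

-- ===== PRECONDITION & SPEC =====
def Spec_extract_test_code_snippets_py (test_code : String) (test_names : List String) (out : String) : Prop := out = extract_test_code_snippets_py_alt test_code test_names
instance (test_code : String) (test_names : List String) (out : String) : Decidable (Spec_extract_test_code_snippets_py test_code test_names out) := by unfold Spec_extract_test_code_snippets_py; infer_instance

-- ===== CLAIM (what is proved, stated in full; the proofs are below) =====
def Claim_equal_extract_test_code_snippets_py : Prop := ∀ (test_code : String) (test_names : List String), Dom_extract_test_code_snippets_py test_code test_names → Spec_extract_test_code_snippets_py test_code test_names (extract_test_code_snippets_py test_code test_names)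

-- ===== LEMMAS AND PROOFS =====

-- proof-side: the lines a block keeps after its first line — up to and including the first boundary line
def pvTakeIncl (p : String → Bool) : List String → List String
  | [] => []
  | l :: ls => l :: (if p l then [] else pvTakeIncl p ls)

-- proof-side: the whole block starting at a given suffix of lines
def pvBlock (ls : List String) : List String :=
  match ls with
  | [] => []
  | l :: rest => l :: pvTakeIncl pvBoundary rest

lemma pvAInner_true (sub : String) (ls : List String) :
    ∀ acc : List String, acc ≠ [] →
    pvAInnerLoop sub ls true acc = acc ++ pvTakeIncl pvBoundary ls := by
  induction ls with
  | nil => intro acc _; simp [pvAInnerLoop, pvTakeIncl]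
  | cons l ls ih =>
    intro acc hacc
    obtain ⟨a, as, rfl⟩ := List.exists_cons_of_ne_nil hacc
    by_cases hb : pvBoundary l
    · simp [pvAInnerLoop, hb, pvTakeIncl]
    · have hrec := ih ((a :: as) ++ [l]) (by simp)
      simp only [List.cons_append] at hrec
      simp [pvAInnerLoop, hb, pvTakeIncl, hrec]

lemma pvAInner_eq_block (sub : String) (lines : List String) :
    pvAInnerLoop sub lines false [] =
      match lines.findIdx? (fun l => PySem.Str.isIn sub l) with
      | none => []
      | some i => pvBlock (lines.drop i) := by
  induction lines with
  | nil => simp [pvAInnerLoop]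
  | cons l ls ih =>
    by_cases h : PySem.Chars.isIn sub.toList l.toList
    · simp [pvAInnerLoop, h, List.findIdx?_cons, pvBlock,
        pvAInner_true sub ls [l] (by simp)]
    · simp only [pvAInnerLoop, PySem.Str.isIn_eq, h, if_false, Bool.false_eq_true,
        List.findIdx?_cons, ih]
      cases hf : ls.findIdx? (fun l => PySem.Str.isIn sub l) <;>
        simp only [PySem.Str.isIn_eq] at hf <;> simp [hf]

lemma pvFindStart_eq (needle : String) (ls : List String) :
    ∀ s : Int, pvFindStart needle (PySem.List.enumerate ls s) =
      (ls.findIdx? (fun l => PySem.Str.isIn needle l)).map (fun k => s + Int.ofNat k) := by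
  induction ls with
  | nil => intro s; simp [pvFindStart, PySem.List.enumerate_nil]
  | cons l ls ih =>
    intro s
    by_cases h : PySem.Chars.isIn needle.toList l.toList
    · simp [PySem.List.enumerate_cons, pvFindStart, h, List.findIdx?_cons]
    · simp only [PySem.List.enumerate_cons, pvFindStart, PySem.Str.isIn_eq, h, if_false,
        List.findIdx?_cons, Bool.false_eq_true, ih (s + 1)]
      cases hf : ls.findIdx? (fun l => PySem.Str.isIn needle l) <;>
        simp only [PySem.Str.isIn_eq] at hf <;> simp [hf] <;> omega

lemma pvBoundsFind (ls : List String) :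
    ∀ (s t : Int),
    ((((PySem.List.enumerate ls s).filter (fun p => pvBoundary p.2)).map (·.1)).find?
        (fun b => decide (t < b)))
      = ((ls.drop ((t + 1 - s).toNat)).findIdx? pvBoundary).map (fun k => max s (t + 1) + Int.ofNat k) := by
  induction ls with
  | nil => intro s t; simp
  | cons l ls ih =>
    intro s t
    by_cases hb : pvBoundary l
    · by_cases hts : t < s
      · have h0 : (t + 1 - s).toNat = 0 := by omega
        have hm : max s (t + 1) = s := by omega
        simp [PySem.List.enumerate_cons, hb, h0, List.findIdx?_cons, hts]
      · have h1 : (t + 1 - s).toNat = (t + 1 - (s + 1)).toNat + 1 := by omega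
        have hm : max (s + 1) (t + 1) = max s (t + 1) := by omega
        have hts' : decide (t < s) = false := by simp [hts]
        simp only [PySem.List.enumerate_cons, List.filter_cons, hb, if_true, List.map_cons,
          List.find?_cons, hts', h1, List.drop_succ_cons,
          ih (s + 1) t, hm]
    · by_cases hts : t < s
      · have h0 : (t + 1 - s).toNat = 0 := by omega
        have h0' : (t + 1 - (s + 1)).toNat = 0 := by omega
        have hm : max (s + 1) (t + 1) = s + 1 := by omega
        have hm2 : max s (t + 1) = s := by omega
        simp only [PySem.List.enumerate_cons, List.filter_cons, hb, Bool.false_eq_true, if_false,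
          ih (s + 1) t, h0, h0', List.drop_zero, List.findIdx?_cons, Option.map_map, hm, hm2]
        cases ls.findIdx? pvBoundary with
        | none => simp
        | some k => simp; omega
      · have h1 : (t + 1 - s).toNat = (t + 1 - (s + 1)).toNat + 1 := by omega
        have hm : max (s + 1) (t + 1) = max s (t + 1) := by omega
        simp only [PySem.List.enumerate_cons, List.filter_cons, hb, Bool.false_eq_true, if_false,
          ih (s + 1) t, h1, List.drop_succ_cons, hm]

lemma pvTakeIncl_eq (p : String → Bool) (xs : List String) :
    pvTakeIncl p xs = match xs.findIdx? p with
      | none => xs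
      | some k => xs.take (k + 1) := by
  induction xs with
  | nil => simp [pvTakeIncl]
  | cons l ls ih =>
    by_cases h : p l
    · simp [pvTakeIncl, h, List.findIdx?_cons]
    · simp only [pvTakeIncl, h, Bool.false_eq_true, if_false, List.findIdx?_cons, ih]
      cases ls.findIdx? p <;> simp

lemma pvPerName (lines : List String) (sub : String) (acc : List String) :
    (let test_lines := pvAInnerLoop sub lines false []
     if test_lines ≠ [] then acc ++ [PySem.Str.join "\n" test_lines] else acc)
    = (match pvFindStart sub (PySem.List.enumerate lines 0) with
       | none => acc
       | some start =>
         let e := (((((PySem.List.enumerate lines 0).filter (fun p => pvBoundary p.2)).map (·.1)).find?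
             (fun b => decide (start < b))).getD (PySem.List.len lines - 1))
         acc ++ [PySem.Str.join "\n" (PySem.List.slice lines (some start) (some (e + 1)))]) := by
  rw [pvAInner_eq_block, pvFindStart_eq]
  cases hf : lines.findIdx? (fun l => PySem.Str.isIn sub l) with
  | none => simp
  | some i =>
    have hi : i < lines.length := (List.findIdx?_eq_some_iff_findIdx_eq.mp hf).1
    simp only [Option.map_some, zero_add]
    rw [pvBoundsFind]
    simp only [Int.ofNat_eq_natCast]
    have hd : ((i : Int) + 1 - 0).toNat = i + 1 := by omega
    have hm : max (0 : Int) ((i : Int) + 1) = (i : Int) + 1 := by omega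
    rw [hd, hm]
    have hblock : pvBlock (lines.drop i) = lines[i] :: pvTakeIncl pvBoundary (lines.drop (i + 1)) := by
      rw [← List.getElem_cons_drop hi]; rfl
    have hne : lines.drop i ≠ [] := by
      intro h0
      have := List.drop_eq_nil_iff.mp h0
      omega
    have hdrop : lines.drop i = lines[i] :: lines.drop (i + 1) := (List.getElem_cons_drop hi).symm
    cases hk : (lines.drop (i + 1)).findIdx? pvBoundary with
    | none =>
      have h1 : PySem.List.len lines - 1 + 1 = ((lines.length : Nat) : Int) := by
        simp [PySem.List.len_eq]
      have htk : (lines.drop i).take (lines.length - i) = lines.drop i := by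
        apply List.take_of_length_le; simp
      rw [Option.map_none, Option.getD_none, h1,
        PySem.List.slice_natCast lines i lines.length, htk, hblock, pvTakeIncl_eq, hk]
      simp [← hdrop, hne]
    | some k =>
      have hcast : (i : Int) + 1 + (k : Int) + 1 = ((i + k + 2 : Nat) : Int) := by push_cast; ring
      have hi2 : i + k + 2 - i = k + 2 := by omega
      rw [Option.map_some, Option.getD_some, hcast,
        PySem.List.slice_natCast lines i (i + k + 2), hi2, hblock, pvTakeIncl_eq, hk,
        hdrop, List.take_succ_cons]
      simp

-- ===== VERDICT (by name: the statement is the Claim_ definition above) =====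
theorem extract_test_code_snippets_py_spec : Claim_equal_extract_test_code_snippets_py := by
  intro test_code test_names _
  unfold Spec_extract_test_code_snippets_py
  unfold extract_test_code_snippets_py extract_test_code_snippets_py_alt
  refine congrArg (PySem.Str.join "\n\n") ?_
  refine PySem.List.foldl_congr_mem _ _ _ _ fun acc name _ => ?_
  exact pvPerName _ ("def " ++ name) acc
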